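-- pv_equiv track=rewrite | github.com/neestoralvz/ce-simple | .archive/cce-legacy/scripts/intelligence/concept-relationship-mapper.py | _calculate_co_occurrence
-- ===== SOURCE A (Python) =====
-- from typing import Dict, List, Tuple, Set, Any, Optional
--
-- def _calculate_co_occurrence(concept_a: Dict[str, Any], concept_b: Dict[str, Any],
--                            file_concepts: Dict[str, List[Dict]]) -> int:
--     """Calculate co-occurrence frequency of two concepts"""
--     co_occurrence_count = 0
--
--     # Count files where both concepts appear
--     for file_path, file_concept_list in file_concepts.items():
--         file_concept_ids = {c['id'] for c in file_concept_list}
--         if concept_a['id'] in file_concept_ids and concept_b['id'] in file_concept_ids: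
--             co_occurrence_count += 1
--
--     return co_occurrence_count
-- ===== SOURCE B (Python) =====
-- def _calculate_co_occurrence(concept_a, concept_b, file_concepts):
--     """Calculate co-occurrence frequency of two concepts"""
--     id_a = concept_a['id']
--     id_b = concept_b['id']
--     files_with_a = set()
--     files_with_b = set()
--     for file_path, file_concept_list in file_concepts.items():
--         for c in file_concept_list:
--             cid = c['id']
--             if cid == id_a:
--                 files_with_a.add(file_path)
--             if cid == id_b:
--                 files_with_b.add(file_path)
--     return len(files_with_a & files_with_b)
-- ===== Notes on version B (the rewrite author's own statement) =====
-- stated objective: alternative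
-- what changed: Instead of building a per-file dedup set of concept ids and incrementing a co-occurrence counter per file, B scans each file's concept list once, maintains two indexes (the set of file paths containing concept_a's id and the set containing concept_b's id) and returns the size of their intersection.
-- outside the precondition, e.g. on _calculate_co_occurrence({'name': 'x'}, {'id': 'b'}, {}): A returns 0, B raises KeyError
import Mathlib
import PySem

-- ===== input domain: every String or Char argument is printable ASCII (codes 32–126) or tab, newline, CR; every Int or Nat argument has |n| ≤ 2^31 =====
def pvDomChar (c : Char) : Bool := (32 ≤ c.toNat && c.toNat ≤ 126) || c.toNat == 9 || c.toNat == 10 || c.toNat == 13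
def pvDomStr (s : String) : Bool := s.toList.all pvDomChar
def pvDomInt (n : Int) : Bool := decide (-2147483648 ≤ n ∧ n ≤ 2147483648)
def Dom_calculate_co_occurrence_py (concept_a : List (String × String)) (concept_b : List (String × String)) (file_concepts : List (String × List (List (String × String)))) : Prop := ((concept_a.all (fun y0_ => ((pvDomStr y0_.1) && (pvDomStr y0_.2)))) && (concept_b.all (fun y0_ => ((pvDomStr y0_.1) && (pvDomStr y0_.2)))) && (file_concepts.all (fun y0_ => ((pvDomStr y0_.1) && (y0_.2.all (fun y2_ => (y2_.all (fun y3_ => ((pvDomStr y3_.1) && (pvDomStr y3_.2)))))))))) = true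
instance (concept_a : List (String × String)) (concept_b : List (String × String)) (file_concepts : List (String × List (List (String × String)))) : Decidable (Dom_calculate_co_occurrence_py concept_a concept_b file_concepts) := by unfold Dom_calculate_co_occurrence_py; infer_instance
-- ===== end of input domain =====

-- B replaces A's per-file dedup-set + running counter with two file-path indexes filled in one
-- pass and intersected at the end (alternative decomposition, similar cost).


-- ===== PORT A =====
-- d['id'] (total form; Pre_ guarantees the key is present, so the default is never the value used)
def pvGetId (d : List (String × String)) : String :=
  ((PySem.Dict.mk d).get? "id").getD ""

def calculate_co_occurrence_py (concept_a : List (String × String)) (concept_b : List (String × String)) (file_concepts : List (String × List (List (String × String)))) : Int :=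
  file_concepts.foldl
    (fun co_occurrence_count fp =>
      let file_concept_ids : PySem.Set String :=
        PySem.Set.ofList (fp.2.map (fun c => pvGetId c))
      if PySem.Set.contains file_concept_ids (pvGetId concept_a)
          && PySem.Set.contains file_concept_ids (pvGetId concept_b) then
        co_occurrence_count + 1
      else
        co_occurrence_count) 0

-- ===== PORT B =====
def calculate_co_occurrence_py_alt (concept_a : List (String × String)) (concept_b : List (String × String)) (file_concepts : List (String × List (List (String × String)))) : Int :=
  let id_a := pvGetId concept_a
  let id_b := pvGetId concept_b
  let st :=
    file_concepts.foldl
      (fun (st : PySem.Set String × PySem.Set String) fp =>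
        fp.2.foldl
          (fun (st : PySem.Set String × PySem.Set String) c =>
            let cid := pvGetId c
            (if cid == id_a then PySem.Set.add st.1 fp.1 else st.1,
             if cid == id_b then PySem.Set.add st.2 fp.1 else st.2)) st)
      (PySem.Set.empty, PySem.Set.empty)
  PySem.Set.len (PySem.Set.inter st.1 st.2)

-- ===== PRECONDITION & SPEC =====
-- Pre_ excludes inputs where some dict lacks the 'id' key (A raises KeyError there except where its
-- short-circuit skips the lookup, in which case B's up-front lookup naturally raises) and
-- association lists with duplicate file paths, which cannot arise from a Python dict.
def Pre_calculate_co_occurrence_py (concept_a : List (String × String)) (concept_b : List (String × String)) (file_concepts : List (String × List (List (String × String)))) : Prop :=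
  (PySem.Dict.mk concept_a).contains "id" = true ∧
  (PySem.Dict.mk concept_b).contains "id" = true ∧
  (∀ fp ∈ file_concepts, ∀ c ∈ fp.2, (PySem.Dict.mk c).contains "id" = true) ∧
  (file_concepts.map Prod.fst).Nodup
instance (concept_a : List (String × String)) (concept_b : List (String × String)) (file_concepts : List (String × List (List (String × String)))) : Decidable (Pre_calculate_co_occurrence_py concept_a concept_b file_concepts) := by unfold Pre_calculate_co_occurrence_py; infer_instance

def pvWitness_calculate_co_occurrence_py : (List (String × String)) × (List (String × String)) × (List (String × List (List (String × String)))) :=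
  ([("id", "a")], [("id", "b")], [("f.md", [[("id", "a")], [("id", "b")]])])

def Spec_calculate_co_occurrence_py (concept_a : List (String × String)) (concept_b : List (String × String)) (file_concepts : List (String × List (List (String × String)))) (out : Int) : Prop := out = calculate_co_occurrence_py_alt concept_a concept_b file_concepts
instance (concept_a : List (String × String)) (concept_b : List (String × String)) (file_concepts : List (String × List (List (String × String)))) (out : Int) : Decidable (Spec_calculate_co_occurrence_py concept_a concept_b file_concepts out) := by unfold Spec_calculate_co_occurrence_py; infer_instance

-- ===== CLAIM (what is proved, stated in full; the proofs are below) =====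
def Claim_equal_calculate_co_occurrence_py : Prop := ∀ (concept_a : List (String × String)) (concept_b : List (String × String)) (file_concepts : List (String × List (List (String × String)))), Dom_calculate_co_occurrence_py concept_a concept_b file_concepts → Pre_calculate_co_occurrence_py concept_a concept_b file_concepts → Spec_calculate_co_occurrence_py concept_a concept_b file_concepts (calculate_co_occurrence_py concept_a concept_b file_concepts)

-- ===== LEMMAS AND PROOFS =====

-- B's inner loop over one file's concept list: each index gains the file's path iff the id occurs.
theorem pv_inner (cs : List (List (String × String))) (fa fb : List String)
    (path ida idb : String) :
    cs.foldl
      (fun (st : PySem.Set String × PySem.Set String) c =>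
        (if pvGetId c == ida then PySem.Set.add st.1 path else st.1,
         if pvGetId c == idb then PySem.Set.add st.2 path else st.2)) (fa, fb)
    = ((if cs.any (fun c => pvGetId c == ida) then PySem.Set.add fa path else fa),
       (if cs.any (fun c => pvGetId c == idb) then PySem.Set.add fb path else fb)) := by
  induction cs generalizing fa fb with
  | nil => simp
  | cons c cs ih =>
    simp only [List.foldl_cons, List.any_cons, Bool.or_eq_true]
    rw [ih]
    have hadd : ∀ (s : PySem.Set String), PySem.Set.add (PySem.Set.add s path) path
        = PySem.Set.add s path := by
      intro s
      exact PySem.Set.add_of_mem ((PySem.Set.mem_add s path path).mpr (Or.inr rfl))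
    by_cases h1 : (pvGetId c == ida) = true <;> by_cases h2 : (pvGetId c == idb) = true <;>
      simp [h1, h2]

-- Adding a fresh path to the indexes changes the intersection size by 1 exactly when it went into both.
theorem pv_step (fa fb : List String) (path : String) (pa pb : Bool)
    (hfa : path ∉ fa) (hfb : path ∉ fb) :
    PySem.Set.len
      (PySem.Set.inter (if pa then PySem.Set.add fa path else fa)
        (if pb then PySem.Set.add fb path else fb))
    = PySem.Set.len (PySem.Set.inter fa fb) + (if pa && pb then 1 else 0) := by
  have hcong : List.filter (fun x => List.contains (fb ++ [path]) x) fa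
      = List.filter (fun x => List.contains fb x) fa := by
    apply List.filter_congr
    intro x hx
    have hxp : (x == path) = false := beq_eq_false_iff_ne.mpr (fun h => hfa (h ▸ hx))
    simp only [List.contains_append, List.contains_cons, List.contains_nil, hxp, Bool.or_false]
  have hpf : List.contains fb path = false := by
    simp only [List.contains_eq_mem]
    exact decide_eq_false hfb
  have hpt : List.contains (fb ++ [path]) path = true := by
    simp only [List.contains_eq_mem]
    exact decide_eq_true (by simp)
  cases pa <;> cases pb <;>
    simp only [Bool.false_eq_true, Bool.false_and, Bool.and_false, Bool.and_self,
      if_false, if_true, PySem.Set.add_of_not_mem hfa, PySem.Set.add_of_not_mem hfb,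
      PySem.Set.inter, PySem.Set.len, PySem.Set.contains]
  · omega
  · rw [hcong]; omega
  · rw [List.filter_append]
    simp only [List.filter_cons, hpf, Bool.false_eq_true, if_false, List.filter_nil,
      List.append_nil]
    omega
  · rw [List.filter_append, hcong]
    simp only [List.filter_cons, hpt, if_true, List.filter_nil]
    rw [List.length_append]
    simp only [List.length_cons, List.length_nil]
    omega

-- Main loop invariant relating A's counter to the size of the intersection of B's indexes.
theorem pv_main (ida idb : String)
    (fcs : List (String × List (List (String × String)))) (fa fb : List String) (cnt : Int)
    (hnd : (fcs.map Prod.fst).Nodup)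
    (hfa : ∀ p ∈ fcs, p.1 ∉ fa) (hfb : ∀ p ∈ fcs, p.1 ∉ fb) :
    (fcs.foldl
      (fun co_occurrence_count fp =>
        let file_concept_ids : PySem.Set String :=
          PySem.Set.ofList (fp.2.map (fun c => pvGetId c))
        if PySem.Set.contains file_concept_ids ida
            && PySem.Set.contains file_concept_ids idb then
          co_occurrence_count + 1
        else co_occurrence_count) cnt)
    = cnt + (PySem.Set.len (PySem.Set.inter
        (fcs.foldl
          (fun (st : PySem.Set String × PySem.Set String) fp =>
            fp.2.foldl
              (fun (st : PySem.Set String × PySem.Set String) c =>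
                (if pvGetId c == ida then PySem.Set.add st.1 fp.1 else st.1,
                 if pvGetId c == idb then PySem.Set.add st.2 fp.1 else st.2)) st) (fa, fb)).1
        (fcs.foldl
          (fun (st : PySem.Set String × PySem.Set String) fp =>
            fp.2.foldl
              (fun (st : PySem.Set String × PySem.Set String) c =>
                (if pvGetId c == ida then PySem.Set.add st.1 fp.1 else st.1,
                 if pvGetId c == idb then PySem.Set.add st.2 fp.1 else st.2)) st) (fa, fb)).2)
        - PySem.Set.len (PySem.Set.inter fa fb)) := by
  induction fcs generalizing fa fb cnt with
  | nil => simp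
  | cons fp fcs ih =>
    simp only [List.map_cons, List.nodup_cons, List.mem_map] at hnd
    obtain ⟨hndhd, hndtl⟩ := hnd
    have hfahd : fp.1 ∉ fa := hfa fp (by simp)
    have hfbhd : fp.1 ∉ fb := hfb fp (by simp)
    simp only [List.foldl_cons]
    rw [pv_inner]
    set pa := fp.2.any (fun c => pvGetId c == ida) with hpa
    set pb := fp.2.any (fun c => pvGetId c == idb) with hpb
    have hcond : (PySem.Set.contains (PySem.Set.ofList (fp.2.map (fun c => pvGetId c))) ida
        && PySem.Set.contains (PySem.Set.ofList (fp.2.map (fun c => pvGetId c))) idb)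
        = (pa && pb) := by
      have h1 : PySem.Set.contains (PySem.Set.ofList (fp.2.map (fun c => pvGetId c))) ida = pa := by
        rw [hpa]
        by_cases h : ida ∈ fp.2.map (fun c => pvGetId c)
        · have := (PySem.Set.contains_iff (PySem.Set.ofList (fp.2.map (fun c => pvGetId c))) ida).mpr
            ((PySem.Set.mem_ofList _ _).mpr h)
          rw [this]
          simp only [List.mem_map] at h
          obtain ⟨c, hc, hceq⟩ := h
          symm
          simp only [List.any_eq_true]
          exact ⟨c, hc, by simp [hceq]⟩
        · have : PySem.Set.contains (PySem.Set.ofList (fp.2.map (fun c => pvGetId c))) ida = false := by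
            by_contra hh
            have := (PySem.Set.contains_iff (PySem.Set.ofList (fp.2.map (fun c => pvGetId c))) ida).mp
              (by revert hh; cases PySem.Set.contains (PySem.Set.ofList (fp.2.map (fun c => pvGetId c))) ida <;> simp)
            exact h ((PySem.Set.mem_ofList _ _).mp this)
          rw [this]
          symm
          simp only [List.any_eq_false]
          intro c hc
          simp only [beq_iff_eq]
          intro hceq
          exact h (List.mem_map.mpr ⟨c, hc, hceq⟩)
      have h2 : PySem.Set.contains (PySem.Set.ofList (fp.2.map (fun c => pvGetId c))) idb = pb := by
        rw [hpb]
        by_cases h : idb ∈ fp.2.map (fun c => pvGetId c)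
        · have := (PySem.Set.contains_iff (PySem.Set.ofList (fp.2.map (fun c => pvGetId c))) idb).mpr
            ((PySem.Set.mem_ofList _ _).mpr h)
          rw [this]
          simp only [List.mem_map] at h
          obtain ⟨c, hc, hceq⟩ := h
          symm
          simp only [List.any_eq_true]
          exact ⟨c, hc, by simp [hceq]⟩
        · have : PySem.Set.contains (PySem.Set.ofList (fp.2.map (fun c => pvGetId c))) idb = false := by
            by_contra hh
            have := (PySem.Set.contains_iff (PySem.Set.ofList (fp.2.map (fun c => pvGetId c))) idb).mp
              (by revert hh; cases PySem.Set.contains (PySem.Set.ofList (fp.2.map (fun c => pvGetId c))) idb <;> simp)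
            exact h ((PySem.Set.mem_ofList _ _).mp this)
          rw [this]
          symm
          simp only [List.any_eq_false]
          intro c hc
          simp only [beq_iff_eq]
          intro hceq
          exact h (List.mem_map.mpr ⟨c, hc, hceq⟩)
      rw [h1, h2]
    have hfa' : ∀ p ∈ fcs, p.1 ∉ (if pa then PySem.Set.add fa fp.1 else fa) := by
      intro p hp
      have hne : p.1 ≠ fp.1 := fun h => hndhd ⟨p, hp, h⟩
      cases pa <;> simp [PySem.Set.mem_add, hne, hfa p (by simp [hp])]
    have hfb' : ∀ p ∈ fcs, p.1 ∉ (if pb then PySem.Set.add fb fp.1 else fb) := by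
      intro p hp
      have hne : p.1 ≠ fp.1 := fun h => hndhd ⟨p, hp, h⟩
      cases pb <;> simp [PySem.Set.mem_add, hne, hfb p (by simp [hp])]
    rw [ih _ _ _ hndtl hfa' hfb']
    rw [pv_step fa fb fp.1 pa pb hfahd hfbhd]
    simp only [hcond]
    cases pa && pb <;> simp <;> ring

-- ===== VERDICT (by name: the statement is the Claim_ definition above) =====
theorem calculate_co_occurrence_py_spec : Claim_equal_calculate_co_occurrence_py := by
  intro concept_a concept_b file_concepts _hdom _hpre
  unfold Spec_calculate_co_occurrence_py calculate_co_occurrence_py calculate_co_occurrence_py_alt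
  rw [pv_main (pvGetId concept_a) (pvGetId concept_b) file_concepts [] [] 0
    _hpre.2.2.2 (by simp) (by simp)]
  simp [PySem.Set.inter, PySem.Set.len, PySem.Set.empty]
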